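-- pv_equiv track=rewrite | github.com/mfnch/pyrtist | boxer/src/lib/docbase.py | text_writer
-- ===== SOURCE A (Python) =====
-- max_chars_per_line = 79
--
-- endline = "\n"
--
-- def text_writer(pieces, sep=", ", line_sep=None, max_line_width=None):
--   """Similarly to str.join, this function concatenates the strings contained
--   in the list ``pieces`` separating them with the separator ``sep``.
--   However, the width of the line is always kept below ``max_line_width``,
--   if possible. This means that when a line would exceed this limit, a new line
--   is started.
--   NOTE: each element of pieces is filtered through the function str() before
--     being used.
--   """
--
--   mlw = max_line_width
--   if mlw == None:
--     mlw = max_chars_per_line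
--   lsep = line_sep
--   if lsep == None:
--     lsep = endline
--   text = ""
--
--   this_line = ""
--   cur_sep = ""
--   for piece in pieces:
--     p = str(cur_sep) + str(piece)
--     lp = len(p)
--     lts = len(this_line)
--     if lts == 0 or lts + lp <= mlw:
--       this_line += p
--       cur_sep = sep
--
--     else:
--       text += this_line + lsep
--       this_line = str(piece)
--       cur_sep = sep
--
--   if len(this_line) > 0:
--     text += this_line + lsep
--   return text
-- ===== SOURCE B (Python) =====
-- def text_writer(pieces, sep=", ", line_sep=None, max_line_width=None):
--     """Chunk-peeling rewrite: scan lengths to find each line's extent with an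
--     index, slice the pieces list into chunks, then render each chunk with
--     sep.join plus the line separator."""
--     mlw = 79 if max_line_width is None else max_line_width
--     lsep = "\n" if line_sep is None else line_sep
--     s = str(sep)
--     ps = [str(p) for p in pieces]
--     chunks = []
--     i = 0
--     while i < len(ps):
--         cur_len = len(ps[i])
--         j = i + 1
--         while j < len(ps) and (cur_len == 0 or cur_len + len(s) + len(ps[j]) <= mlw):
--             cur_len += len(s) + len(ps[j])
--             j += 1
--         chunks.append(ps[i:j])
--         i = j
--     lines = [s.join(c) for c in chunks]
--     return "".join(line + str(lsep) for line in lines if line)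
-- ===== Notes on version B (the rewrite author's own statement) =====
-- stated objective: alternative
-- what changed: Replaces A's single per-piece state machine carrying (text, this_line, cur_sep) with flush branches by a chunk-peeling scheme: an index scan over piece lengths finds each line's extent, the pieces list is sliced into chunks, and a separate rendering pass joins each chunk with sep and appends the line separator.
import Mathlib
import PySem

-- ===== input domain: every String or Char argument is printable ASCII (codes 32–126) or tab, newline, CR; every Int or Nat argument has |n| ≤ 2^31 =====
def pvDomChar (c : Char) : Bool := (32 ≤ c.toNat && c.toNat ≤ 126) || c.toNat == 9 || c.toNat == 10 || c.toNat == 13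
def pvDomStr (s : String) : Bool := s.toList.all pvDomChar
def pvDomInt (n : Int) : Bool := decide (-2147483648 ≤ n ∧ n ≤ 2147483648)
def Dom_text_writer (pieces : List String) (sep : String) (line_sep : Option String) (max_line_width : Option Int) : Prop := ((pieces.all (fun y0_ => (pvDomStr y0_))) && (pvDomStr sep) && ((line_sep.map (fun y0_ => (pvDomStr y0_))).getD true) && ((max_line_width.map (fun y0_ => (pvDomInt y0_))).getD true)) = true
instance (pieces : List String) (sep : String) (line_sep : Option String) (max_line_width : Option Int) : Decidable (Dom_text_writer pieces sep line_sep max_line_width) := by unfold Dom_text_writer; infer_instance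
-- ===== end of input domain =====

-- B replaces A's one-pass state machine by chunk peeling (scan lengths for each line's
-- extent, slice into chunks, render with join); same cost ("alternative"), same output.
-- Neither program mutates its arguments.

-- ===== PORT A =====
-- One fold carrying (text, this_line, cur_sep), exactly A's loop state (strings as List Char).
def text_writer (pieces : List String) (sep : String) (line_sep : Option String) (max_line_width : Option Int) : String :=
  let mlw : Int := max_line_width.getD 79
  let lsep : List Char := (line_sep.getD "\n").toList
  let st := (pieces.map String.toList).foldl
    (fun (st : List Char × List Char × List Char) piece =>
      let p := st.2.2 ++ piece
      let lp := p.length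
      let lts := st.2.1.length
      if lts = 0 ∨ (lts : Int) + lp ≤ mlw then
        (st.1, st.2.1 ++ p, sep.toList)
      else
        (st.1 ++ st.2.1 ++ lsep, piece, sep.toList))
    ([], [], [])
  if st.2.1.length > 0 then String.ofList (st.1 ++ st.2.1 ++ lsep) else String.ofList st.1

-- ===== PORT B =====
-- inner while loop: how many further pieces extend the current line (cur_len, j advance)
def pvTakeB (sLen : Nat) (mlw : Int) : Nat → List (List Char) → Nat
  | _, [] => 0
  | curLen, p :: rest =>
    if curLen = 0 ∨ (curLen : Int) + sLen + p.length ≤ mlw then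
      1 + pvTakeB sLen mlw (curLen + sLen + p.length) rest
    else 0

-- outer while loop: peel chunks off the front of ps
def pvSplitB (sLen : Nat) (mlw : Int) : List (List Char) → List (List (List Char))
  | [] => []
  | p :: rest =>
    let n := pvTakeB sLen mlw p.length rest
    (p :: rest.take n) :: pvSplitB sLen mlw (rest.drop n)
  termination_by l => l.length
  decreasing_by simp

def text_writer_alt (pieces : List String) (sep : String) (line_sep : Option String) (max_line_width : Option Int) : String :=
  let mlw : Int := max_line_width.getD 79
  let lsep : List Char := (line_sep.getD "\n").toList
  let s := sep.toList
  let ps := pieces.map String.toList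
  let lines := (pvSplitB s.length mlw ps).map (fun c => PySem.Chars.join s c)
  String.ofList (((lines.filter (fun l => !l.isEmpty)).map (fun l => l ++ lsep)).flatten)

-- ===== PRECONDITION & SPEC =====
def Spec_text_writer (pieces : List String) (sep : String) (line_sep : Option String) (max_line_width : Option Int) (out : String) : Prop := out = text_writer_alt pieces sep line_sep max_line_width
instance (pieces : List String) (sep : String) (line_sep : Option String) (max_line_width : Option Int) (out : String) : Decidable (Spec_text_writer pieces sep line_sep max_line_width out) := by unfold Spec_text_writer; infer_instance

-- ===== CLAIM (what is proved, stated in full; the proofs are below) =====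
def Claim_equal_text_writer : Prop := ∀ (pieces : List String) (sep : String) (line_sep : Option String) (max_line_width : Option Int), Dom_text_writer pieces sep line_sep max_line_width → Spec_text_writer pieces sep line_sep max_line_width (text_writer pieces sep line_sep max_line_width)

-- ===== LEMMAS AND PROOFS =====

-- B's rendering pass, as a named function for the proofs
def pvRender (lsep : List Char) (lines : List (List Char)) : List Char :=
  ((lines.filter (fun l => !l.isEmpty)).map (fun l => l ++ lsep)).flatten

lemma pvRender_cons_ne (lsep l : List Char) (L : List (List Char)) (h : l ≠ []) :
    pvRender lsep (l :: L) = l ++ lsep ++ pvRender lsep L := by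
  simp [pvRender, h]

lemma pvSplitB_nil (sLen : Nat) (mlw : Int) : pvSplitB sLen mlw [] = [] := by
  rw [pvSplitB]

lemma pvSplitB_cons (sLen : Nat) (mlw : Int) (p : List Char) (rest : List (List Char)) :
    pvSplitB sLen mlw (p :: rest)
      = (p :: rest.take (pvTakeB sLen mlw p.length rest))
          :: pvSplitB sLen mlw (rest.drop (pvTakeB sLen mlw p.length rest)) := by
  rw [pvSplitB]

lemma pvJoin_append_singleton (s : List Char) (cur : List (List Char)) (p : List Char) :
    PySem.Chars.join s (cur ++ [p]) =
      PySem.Chars.join s cur ++ (if cur.isEmpty then [] else s) ++ p := by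
  induction cur with
  | nil => simp [PySem.Chars.join_nil, PySem.Chars.join_singleton]
  | cons a cur ih =>
    cases cur with
    | nil => simp [PySem.Chars.join_singleton, PySem.Chars.join_cons_cons]
    | cons b cur =>
      simp only [List.cons_append, PySem.Chars.join_cons_cons] at *
      simp [ih]

-- the chunk simulation: starting with a non-empty line-in-progress `cur`, A's loop over `rest`
-- (followed by the final flush) produces exactly B's rendering of the remaining chunks
lemma pv_chunk (s lsep : List Char) (mlw : Int) :
    ∀ (rest cur : List (List Char)) (text : List Char), cur ≠ [] →
    (let st := rest.foldl
        (fun (st : List Char × List Char × List Char) piece =>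
          let p := st.2.2 ++ piece
          let lp := p.length
          let lts := st.2.1.length
          if lts = 0 ∨ (lts : Int) + lp ≤ mlw then
            (st.1, st.2.1 ++ p, s)
          else
            (st.1 ++ st.2.1 ++ lsep, piece, s))
        (text, PySem.Chars.join s cur, s)
     if st.2.1.length > 0 then st.1 ++ st.2.1 ++ lsep else st.1)
    = text ++ pvRender lsep
        (((cur ++ rest.take (pvTakeB s.length mlw (PySem.Chars.join s cur).length rest))
            :: pvSplitB s.length mlw
                (rest.drop (pvTakeB s.length mlw (PySem.Chars.join s cur).length rest))).map
          (fun c => PySem.Chars.join s c)) := by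
  intro rest
  induction rest with
  | nil =>
    intro cur text _
    simp only [List.foldl_nil, pvTakeB, List.take_nil, List.drop_nil, List.append_nil,
      pvSplitB_nil, List.map_cons, List.map_nil]
    by_cases h : (PySem.Chars.join s cur).length > 0
    · have hne : PySem.Chars.join s cur ≠ [] := by
        intro he; rw [he] at h; simp at h
      rw [if_pos h, pvRender_cons_ne _ _ _ hne]
      simp [pvRender]
    · have he : PySem.Chars.join s cur = [] := by
        cases hc : PySem.Chars.join s cur with
        | nil => rfl
        | cons a l => rw [hc] at h; simp at h
      rw [if_neg h]
      simp [pvRender, he]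
  | cons piece rest ih =>
    intro cur text hcur
    simp only [List.foldl_cons]
    have hlen : (s ++ piece).length = s.length + piece.length := List.length_append ..
    have hiff : ((PySem.Chars.join s cur).length = 0 ∨
          ((PySem.Chars.join s cur).length : Int) + (s ++ piece).length ≤ mlw) ↔
        ((PySem.Chars.join s cur).length = 0 ∨
          ((PySem.Chars.join s cur).length : Int) + s.length + piece.length ≤ mlw) := by
      rw [hlen]; push_cast; omega
    have hjoin : PySem.Chars.join s cur ++ (s ++ piece) = PySem.Chars.join s (cur ++ [piece]) := by
      rw [pvJoin_append_singleton]
      simp [List.isEmpty_iff, hcur]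
    have hjlen : (PySem.Chars.join s (cur ++ [piece])).length
        = (PySem.Chars.join s cur).length + s.length + piece.length := by
      rw [pvJoin_append_singleton]
      simp [List.isEmpty_iff, hcur]
      omega
    by_cases hc : ((PySem.Chars.join s cur).length = 0 ∨
        ((PySem.Chars.join s cur).length : Int) + s.length + piece.length ≤ mlw)
    · rw [if_pos (hiff.mpr hc)]
      -- pvTakeB on piece :: rest takes piece
      have htake : pvTakeB s.length mlw (PySem.Chars.join s cur).length (piece :: rest)
          = pvTakeB s.length mlw ((PySem.Chars.join s cur).length + s.length + piece.length) rest + 1 := by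
        simp only [pvTakeB]
        rw [if_pos (by exact_mod_cast hc)]
        omega
      have := ih (cur ++ [piece]) text (by simp)
      rw [hjlen] at this
      rw [htake, hjoin, this]
      rw [List.take_succ_cons, List.drop_succ_cons]
      simp
    · rw [if_neg (fun h => hc (hiff.mp h))]
      have htake : pvTakeB s.length mlw (PySem.Chars.join s cur).length (piece :: rest) = 0 := by
        simp only [pvTakeB]
        rw [if_neg]
        intro h; exact hc (by exact_mod_cast h)
      have hne : PySem.Chars.join s cur ≠ [] := by
        intro he
        exact hc (Or.inl (by rw [he]; rfl))
      have := ih [piece] (text ++ PySem.Chars.join s cur ++ lsep) (by simp)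
      rw [PySem.Chars.join_singleton] at this
      rw [htake]
      simp only [List.take_zero, List.drop_zero, List.append_nil]
      rw [this]
      conv_rhs => rw [pvSplitB_cons]
      simp only [List.map_cons]
      rw [pvRender_cons_ne _ _ _ hne]
      simp [List.append_assoc]

theorem pv_main (pieces : List String) (sep : String) (line_sep : Option String) (max_line_width : Option Int) :
    text_writer pieces sep line_sep max_line_width = text_writer_alt pieces sep line_sep max_line_width := by
  simp only [text_writer, text_writer_alt]
  cases hps : pieces.map String.toList with
  | nil => simp [pvSplitB_nil]
  | cons p rest =>
    simp only [List.foldl_cons, List.length_nil, List.nil_append, Nat.cast_zero]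
    rw [if_pos (Or.inl trivial)]
    have h := pv_chunk sep.toList (line_sep.getD "\n").toList (max_line_width.getD 79)
      rest [p] [] (by simp)
    rw [PySem.Chars.join_singleton] at h
    simp only [List.nil_append] at h ⊢
    rw [← apply_ite String.ofList]
    congr 1
    rw [h]
    conv_rhs => rw [pvSplitB_cons]
    simp [pvRender]

-- ===== VERDICT (by name: the statement is the Claim_ definition above) =====
theorem text_writer_spec : Claim_equal_text_writer := by
  intro pieces sep line_sep max_line_width _
  unfold Spec_text_writer
  exact pv_main pieces sep line_sep max_line_width
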